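-- pv_equiv track=rewrite | github.com/zeke1806/pbAffectation | src/python/algo_hongrois.py | obtention_marquage
-- ===== SOURCE A (Python) =====
-- def marquage_ligne_a (matrix):
--     """a- Retourne une liste d'index des lignes avec aucun zero encadre"""
--     ligne_marque_a = list()
--     for y, y_elt in enumerate(matrix):
--         if 'E' not in y_elt:
--             ligne_marque_a.append(y)
--     return ligne_marque_a
--
-- def marquage_colonne (matrix, marquage):
--     """b- Marque une colonne ayant un zero barre sur une ligne marquee"""
--     marquage_effectue = False
--     for y, y_elt in enumerate(matrix):
--         for x, x_elt in enumerate(y_elt):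
--             if x_elt == 'B' and y == marquage['ligne'][-1]:
--                 marquage['colonne'].append(x)
--                 marquage_effectue = True
--     return marquage_effectue
--
-- def marquage_ligne_c (matrix, marquage):
--     """c- Marque une ligne ayant un zero encadre sur une colonne marquee"""
--     marquage_effectue = False
--     for y, y_elt in enumerate(matrix):
--         for x, x_elt in enumerate(y_elt):
--             if x_elt == 'E' and x == marquage['colonne'][-1]:
--                 marquage['ligne'].append(y)
--                 marquage_effectue = True
--     return marquage_effectue
--
-- def obtention_marquage (matrix):
--     """Renvoie une liste de marquage de la matrice"""
--     marquage = {
--         'ligne': list(),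
--         'colonne': list()
--     }
--     ligne_marque_a = marquage_ligne_a(matrix)
--     for ligne_a in ligne_marque_a:
--         marquage['ligne'].append(ligne_a)
--         while True:
--             marquage_effectue = marquage_colonne(matrix, marquage)
--             if not marquage_effectue:
--                 break
--             marquage_effectue = marquage_ligne_c(matrix, marquage)
--             if not marquage_effectue:
--                 break
--     return marquage
-- ===== SOURCE B (Python) =====
-- def obtention_marquage(matrix):
--     # precompute: B-columns per row, E-rows per column (one pass each), so the
--     # marking loop does O(1) lookups instead of rescanning the whole matrix
--     b_cols = [[x for x, v in enumerate(row) if v == 'B'] for row in matrix]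
--     e_rows = {}
--     for y, row in enumerate(matrix):
--         for x, v in enumerate(row):
--             if v == 'E':
--                 e_rows.setdefault(x, []).append(y)
--     lignes = []
--     colonnes = []
--     for y, row in enumerate(matrix):
--         if 'E' not in row:
--             lignes.append(y)
--             r = y
--             while True:
--                 cols = b_cols[r]
--                 if not cols:
--                     break
--                 colonnes.extend(cols)
--                 rows = e_rows.get(cols[-1], [])
--                 if not rows:
--                     break
--                 lignes.extend(rows)
--                 r = rows[-1]
--     return {'ligne': lignes, 'colonne': colonnes}
-- ===== Notes on version B (the rewrite author's own statement) =====
-- stated objective: faster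
-- what changed: B precomputes, in one pass, each row's list of 'B'-columns and a dict mapping each column to its list of 'E'-rows, so every iteration of the marking loop is an O(1) lookup instead of A's full-matrix rescan in marquage_colonne/marquage_ligne_c.
import Mathlib
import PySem

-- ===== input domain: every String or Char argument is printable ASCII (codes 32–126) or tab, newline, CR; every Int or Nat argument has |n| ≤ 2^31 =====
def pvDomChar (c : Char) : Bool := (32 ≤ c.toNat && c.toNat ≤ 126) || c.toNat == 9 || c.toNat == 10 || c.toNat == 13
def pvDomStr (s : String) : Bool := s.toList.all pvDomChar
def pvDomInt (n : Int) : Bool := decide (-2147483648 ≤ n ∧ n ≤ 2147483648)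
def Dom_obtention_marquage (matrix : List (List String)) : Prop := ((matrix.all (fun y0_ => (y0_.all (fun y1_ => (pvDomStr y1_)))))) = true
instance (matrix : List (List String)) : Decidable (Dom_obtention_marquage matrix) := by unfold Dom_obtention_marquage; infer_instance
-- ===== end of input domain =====

-- B precomputes, in one pass over the matrix, the list of 'B'-columns of every row and the
-- list of 'E'-rows of every column, so each step of the marking loop is an O(1) lookup
-- instead of A's full-matrix rescan.

-- ===== PORT A =====
def marquage_ligne_a (matrix : List (List String)) : List Int :=
  (PySem.List.enumerate matrix).foldl
    (fun acc p => if "E" ∈ p.2 then acc else acc ++ [p.1]) []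

-- marquage['ligne'][-1] is read through pyGet? (Python raises on an empty list; the
-- function is only ever called with a non-empty 'ligne', so the Option never matters)
def marquage_colonne (matrix : List (List String)) (ligne colonne : List Int) :
    List Int × Bool :=
  (PySem.List.enumerate matrix).foldl
    (fun st p =>
      (PySem.List.enumerate p.2).foldl
        (fun st q =>
          if q.2 = "B" ∧ some p.1 = PySem.List.pyGet? ligne (-1) then (st.1 ++ [q.1], true)
          else st) st)
    (colonne, false)

def marquage_ligne_c (matrix : List (List String)) (ligne colonne : List Int) :
    List Int × Bool :=
  (PySem.List.enumerate matrix).foldl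
    (fun st p =>
      (PySem.List.enumerate p.2).foldl
        (fun st q =>
          if q.2 = "E" ∧ some q.1 = PySem.List.pyGet? colonne (-1) then (st.1 ++ [p.1], true)
          else st) st)
    (ligne, false)

-- the 'while True' loop of A; fuel (matrix.length + 1) is enough on every input where the
-- Python terminates (each pass moves the chain to a fresh row, see Pre_ below)
def obtLoopA (matrix : List (List String)) :
    Nat → List Int → List Int → List Int × List Int
  | 0, ligne, colonne => (ligne, colonne)
  | fuel + 1, ligne, colonne =>
    let pc := marquage_colonne matrix ligne colonne
    if pc.2 = false then (ligne, pc.1)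
    else
      let pl := marquage_ligne_c matrix ligne pc.1
      if pl.2 = false then (pl.1, pc.1)
      else obtLoopA matrix fuel pl.1 pc.1

def obtention_marquage (matrix : List (List String)) : List (String × List Int) :=
  let res := (marquage_ligne_a matrix).foldl
    (fun st a => obtLoopA matrix (matrix.length + 1) (st.1 ++ [a]) st.2) ([], [])
  [("ligne", res.1), ("colonne", res.2)]

-- ===== PORT B =====
-- [x for x, v in enumerate(row) if v == 'B']
def bColsRow (row : List String) : List Int :=
  ((PySem.List.enumerate row).filter (fun q => q.2 == "B")).map (·.1)

-- e_rows.setdefault(x, []).append(y)  =  modify x [] (· ++ [y])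
def eRowsDict (matrix : List (List String)) : PySem.Dict Int (List Int) :=
  (PySem.List.enumerate matrix).foldl
    (fun d p =>
      (PySem.List.enumerate p.2).foldl
        (fun d q => if q.2 = "E" then d.modify q.1 [] (· ++ [p.1]) else d) d)
    PySem.Dict.empty

-- the 'while True' loop of B; r is always a valid row index, cols/rows are non-empty at
-- their [-1] lookups, so the .getD defaults are never used
def obtLoopB (bcols : List (List Int)) (erows : PySem.Dict Int (List Int)) :
    Nat → Int → List Int → List Int → List Int × List Int
  | 0, _, ligne, colonne => (ligne, colonne)
  | fuel + 1, r, ligne, colonne =>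
    let cols := (PySem.List.pyGet? bcols r).getD []
    if cols = [] then (ligne, colonne)
    else
      let colonne' := colonne ++ cols
      let rows := erows.getD ((PySem.List.pyGet? cols (-1)).getD 0) []
      if rows = [] then (ligne, colonne')
      else obtLoopB bcols erows fuel ((PySem.List.pyGet? rows (-1)).getD 0)
             (ligne ++ rows) colonne'

def obtention_marquage_alt (matrix : List (List String)) : List (String × List Int) :=
  let bcols := matrix.map bColsRow
  let erows := eRowsDict matrix
  let res := (PySem.List.enumerate matrix).foldl
    (fun st p =>
      if "E" ∉ p.2 then
        obtLoopB bcols erows (matrix.length + 1) p.1 (st.1 ++ [p.1]) st.2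
      else st) ([], [])
  [("ligne", res.1), ("colonne", res.2)]

-- ===== PRECONDITION & SPEC =====
-- One step of the marking chain: from row r to the last 'E'-row of the last 'B'-column of
-- row r (none = the while loop stops there).
def preStep (matrix : List (List String)) : Option Int → Option Int
  | none => none
  | some r =>
    match PySem.List.pyGet? matrix r with
    | none => none
    | some row =>
      match (((PySem.List.enumerate row).filter (fun q => q.2 == "B")).map (·.1)).getLast? with
      | none => none
      | some c =>
        (((PySem.List.enumerate matrix).filter
            (fun p => PySem.List.pyGet? p.2 c == some "E")).map (·.1)).getLast?

-- Pre_ excludes exactly the matrices on which the Python A loops forever (the marking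
-- chain started at some unmarked-in-step-a row never stops); A returns on every input
-- satisfying Pre_.  The fuelled ports agree even outside Pre_, so the equality proof
-- introduces the hypothesis without consuming it.
def Pre_obtention_marquage (matrix : List (List String)) : Prop :=
  ∀ p ∈ PySem.List.enumerate matrix, "E" ∉ p.2 →
    (preStep matrix)^[matrix.length] (some p.1) = none

instance (matrix : List (List String)) : Decidable (Pre_obtention_marquage matrix) := by
  unfold Pre_obtention_marquage; infer_instance

def pvWitness_obtention_marquage : List (List String) := [["B", "."], ["E", "B"]]

def Spec_obtention_marquage (matrix : List (List String)) (out : List (String × List Int)) : Prop := out = obtention_marquage_alt matrix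
instance (matrix : List (List String)) (out : List (String × List Int)) : Decidable (Spec_obtention_marquage matrix out) := by unfold Spec_obtention_marquage; infer_instance

-- ===== CLAIM (what is proved, stated in full; the proofs are below) =====
def Claim_equal_obtention_marquage : Prop := ∀ (matrix : List (List String)), Dom_obtention_marquage matrix → Pre_obtention_marquage matrix → Spec_obtention_marquage matrix (obtention_marquage matrix)


-- ===== LEMMAS AND PROOFS =====

-- rows holding an 'E' at column c (0 ≤ c), in row order: the value eRowsDict stores at c
def eRowsList (matrix : List (List String)) (c : Int) : List Int :=
  ((PySem.List.enumerate matrix).filter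
    (fun p => decide (PySem.List.pyGet? p.2 c = some "E"))).map (·.1)

-- a fold that conditionally applies g is a fold of g over the filtered list
theorem foldl_guard_filter {α β : Type} (l : List α) (P : α → Prop) [DecidablePred P]
    (g : β → α → β) (init : β) :
    l.foldl (fun d x => if P x then g d x else d) init
      = (l.filter (fun x => decide (P x))).foldl g init := by
  induction l generalizing init with
  | nil => rfl
  | cons x xs ih =>
    by_cases h : P x <;> simp [h, ih]

-- the append-and-set-flag fold of A's inner scans
theorem foldl_mark {α : Type} (l : List α) (P : α → Prop) [DecidablePred P]
    (f : α → Int) (acc : List Int × Bool) :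
    l.foldl (fun st q => if P q then (st.1 ++ [f q], true) else st) acc
      = (acc.1 ++ (l.filter (fun q => decide (P q))).map f,
         acc.2 || !(l.filter (fun q => decide (P q))).isEmpty) := by
  induction l generalizing acc with
  | nil => simp
  | cons x xs ih =>
    by_cases h : P x <;> simp [h, ih]

-- the outer fold of A's scans once the inner fold is summarised per row
theorem foldl_extend {α : Type} (l : List α) (g : α → List Int) (acc : List Int × Bool) :
    l.foldl (fun st p => (st.1 ++ g p, st.2 || !(g p).isEmpty)) acc
      = (acc.1 ++ l.flatMap g, acc.2 || !(l.flatMap g).isEmpty) := by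
  induction l generalizing acc with
  | nil => simp
  | cons x xs ih =>
    simp only [List.foldl_cons, ih, List.flatMap_cons]
    refine Prod.ext (by simp) ?_
    cases hx : (g x).isEmpty <;> cases hxs : (List.flatMap g xs).isEmpty <;>
      simp_all [List.isEmpty_iff]

-- selecting the unique enumerate entry with index c
theorem filter_enumerate_key {α : Type} (l : List α) (s c : Int) (Q : α → Prop)
    [DecidablePred Q] :
    (PySem.List.enumerate l s).filter (fun q => decide (Q q.2 ∧ q.1 = c))
      = if s ≤ c then
          ((l[(c - s).toNat]?).filter (fun x => decide (Q x))).toList.map (fun x => (c, x))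
        else [] := by
  induction l generalizing s with
  | nil => simp [PySem.List.enumerate_nil]
  | cons x xs ih =>
    rw [PySem.List.enumerate_cons]
    by_cases hsc : s = c
    · subst hsc
      have hrest := ih (s + 1)
      rw [if_neg (by omega)] at hrest
      by_cases hQ : Q x <;>
        simp [hQ, Option.filter] <;>
        · intro a b hab hQb
          rw [PySem.List.mem_enumerate_iff] at hab
          obtain ⟨k, hk, hep⟩ := hab
          have := congrArg Prod.fst hep
          simp at this
          omega
    · by_cases hle : s ≤ c
      · have hk : (c - s).toNat = (c - (s + 1)).toNat + 1 := by omega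
        have hrest := ih (s + 1)
        rw [if_pos (by omega)] at hrest
        simp only [List.filter_cons]
        rw [if_neg (by simp [hsc]), hrest, if_pos hle, hk, List.getElem?_cons_succ]
      · have hrest := ih (s + 1)
        rw [if_neg (by omega)] at hrest
        simp only [List.filter_cons]
        rw [if_neg (by simp [hsc]), hrest, if_neg hle]

theorem flatMap_if_singleton {α : Type} (l : List α) (P : α → Prop) [DecidablePred P]
    (f : α → Int) :
    l.flatMap (fun x => if P x then [f x] else [])
      = (l.filter (fun x => decide (P x))).map f := by
  induction l with
  | nil => rfl
  | cons x xs ih => by_cases h : P x <;> simp [h, ih]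

theorem flatMap_guard {α β : Type} (l : List α) (P : α → Prop) [DecidablePred P]
    (g : α → List β) :
    l.flatMap (fun x => if P x then g x else [])
      = (l.filter (fun x => decide (P x))).flatMap g := by
  induction l with
  | nil => rfl
  | cons x xs ih => by_cases h : P x <;> simp [h, ih]

theorem rowE_key (row : List String) (c : Int) (h0 : 0 ≤ c) (y : Int) :
    ((PySem.List.enumerate row).filter (fun q => decide (q.2 = "E" ∧ q.1 = c))).map
        (fun _ => y)
      = if PySem.List.pyGet? row c = some "E" then [y] else [] := by
  rw [filter_enumerate_key row 0 c (fun x => x = "E"), if_pos h0,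
    PySem.List.pyGet?_of_nonneg row h0]
  have : (c - 0).toNat = c.toNat := by omega
  rw [this]
  cases hv : row[c.toNat]? with
  | none => simp
  | some v =>
    by_cases hE : v = "E" <;> simp [Option.filter, hE]

theorem foldl_flatMap {α β γ : Type} (l : List α) (f : α → List β) (g : γ → β → γ)
    (init : γ) :
    (l.flatMap f).foldl g init = l.foldl (fun acc x => (f x).foldl g acc) init := by
  induction l generalizing init with
  | nil => rfl
  | cons x xs ih => simp [List.foldl_append, ih]

theorem marquage_colonne_eq (matrix : List (List String)) (ligne colonne : List Int)
    (r : Int) (h0 : 0 ≤ r) (hn : r < matrix.length)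
    (hr : PySem.List.pyGet? ligne (-1) = some r) :
    marquage_colonne matrix ligne colonne
      = (colonne ++ bColsRow (matrix[r.toNat]'(by omega)),
         !(bColsRow (matrix[r.toNat]'(by omega))).isEmpty) := by
  have hn' : r.toNat < matrix.length := by omega
  unfold marquage_colonne
  rw [hr]
  have hin : ∀ (st : List Int × Bool) (p : Int × List String),
      (PySem.List.enumerate p.2).foldl
        (fun st q => if q.2 = "B" ∧ some p.1 = some r then (st.1 ++ [q.1], true) else st) st
      = (st.1 ++ (if p.1 = r then bColsRow p.2 else []),
         st.2 || !(if p.1 = r then bColsRow p.2 else []).isEmpty) := by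
    intro st p
    rw [foldl_mark (PySem.List.enumerate p.2)
      (fun q => q.2 = "B" ∧ some p.1 = some r) (fun q => q.1) st]
    by_cases hp : p.1 = r
    · have hfc : (PySem.List.enumerate p.2).filter
            (fun q => decide (q.2 = "B" ∧ some p.1 = some r))
          = (PySem.List.enumerate p.2).filter (fun q => q.2 == "B") := by
        apply List.filter_congr
        intro q _
        by_cases hB : q.2 = "B" <;> simp [hp, hB]
      rw [hfc, if_pos hp]
      simp [bColsRow]
    · have h1 : (PySem.List.enumerate p.2).filter
            (fun q => decide (q.2 = "B" ∧ some p.1 = some r)) = [] := by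
        apply List.filter_eq_nil_iff.mpr
        intro q _
        simp [hp]
      rw [h1, if_neg hp]
      simp
  rw [PySem.List.foldl_congr_mem (PySem.List.enumerate matrix) _
      (fun st p => (st.1 ++ (if p.1 = r then bColsRow p.2 else []),
        st.2 || !(if p.1 = r then bColsRow p.2 else []).isEmpty))
      (colonne, false) (fun acc x _ => hin acc x), foldl_extend,
    flatMap_guard (PySem.List.enumerate matrix) (fun p => p.1 = r) (fun p => bColsRow p.2)]
  have hfc2 : (PySem.List.enumerate matrix).filter
        (fun p => decide (p.1 = r))
      = (PySem.List.enumerate matrix).filter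
        (fun p => decide ((fun _ => True) p.2 ∧ p.1 = r)) := by
    apply List.filter_congr
    intro q _
    simp
  rw [hfc2, filter_enumerate_key matrix 0 r (fun _ => True), if_pos h0]
  have ht : (r - 0).toNat = r.toNat := by omega
  rw [ht, List.getElem?_eq_getElem hn']
  simp [Option.filter]

theorem marquage_ligne_c_eq (matrix : List (List String)) (ligne colonne : List Int)
    (c : Int) (h0 : 0 ≤ c) (hc : PySem.List.pyGet? colonne (-1) = some c) :
    marquage_ligne_c matrix ligne colonne
      = (ligne ++ eRowsList matrix c, !(eRowsList matrix c).isEmpty) := by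
  unfold marquage_ligne_c
  rw [hc]
  have hin : ∀ (st : List Int × Bool) (p : Int × List String),
      (PySem.List.enumerate p.2).foldl
        (fun st q => if q.2 = "E" ∧ some q.1 = some c then (st.1 ++ [p.1], true) else st) st
      = (st.1 ++ (if PySem.List.pyGet? p.2 c = some "E" then [p.1] else []),
         st.2 || !(if PySem.List.pyGet? p.2 c = some "E" then [p.1] else []).isEmpty) := by
    intro st p
    rw [foldl_mark (PySem.List.enumerate p.2)
      (fun q => q.2 = "E" ∧ some q.1 = some c) (fun _ => p.1) st]
    have hfc : (PySem.List.enumerate p.2).filter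
          (fun q => decide (q.2 = "E" ∧ some q.1 = some c))
        = (PySem.List.enumerate p.2).filter (fun q => decide (q.2 = "E" ∧ q.1 = c)) := by
      apply List.filter_congr
      intro q _
      simp
    rw [hfc]
    rw [rowE_key p.2 c h0 p.1]
    by_cases hE : PySem.List.pyGet? p.2 c = some "E"
    · have hne : (PySem.List.enumerate p.2).filter
          (fun q => decide (q.2 = "E" ∧ q.1 = c)) ≠ [] := by
        intro hnil
        have := rowE_key p.2 c h0 p.1
        rw [hnil, if_pos hE] at this
        simp at this
      rw [if_pos hE]
      cases hb : ((PySem.List.enumerate p.2).filter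
          (fun q => decide (q.2 = "E" ∧ q.1 = c))).isEmpty
      · simp
      · exact absurd (List.isEmpty_iff.mp hb) hne
    · have hnil : (PySem.List.enumerate p.2).filter
          (fun q => decide (q.2 = "E" ∧ q.1 = c)) = [] := by
        by_contra hne
        have := rowE_key p.2 c h0 p.1
        rw [if_neg hE] at this
        rcases List.exists_mem_of_ne_nil _ hne with ⟨q, hq⟩
        have : p.1 ∈ ([] : List Int) := by
          rw [← this]
          exact List.mem_map_of_mem hq
        simp at this
      rw [if_neg hE, hnil]
      simp
  rw [PySem.List.foldl_congr_mem (PySem.List.enumerate matrix) _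
      (fun st p => (st.1 ++ (if PySem.List.pyGet? p.2 c = some "E" then [p.1] else []),
        st.2 || !(if PySem.List.pyGet? p.2 c = some "E" then [p.1] else []).isEmpty))
      (ligne, false) (fun acc x _ => hin acc x), foldl_extend,
    flatMap_if_singleton (PySem.List.enumerate matrix)
      (fun p => PySem.List.pyGet? p.2 c = some "E") (fun p => p.1)]
  rfl

theorem eRowsDict_getD (matrix : List (List String)) (c : Int) (h0 : 0 ≤ c) :
    (eRowsDict matrix).getD c [] = eRowsList matrix c := by
  unfold eRowsDict
  have hin : ∀ (d : PySem.Dict Int (List Int)) (p : Int × List String),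
      (PySem.List.enumerate p.2).foldl
        (fun d q => if q.2 = "E" then d.modify q.1 [] (· ++ [p.1]) else d) d
      = (((PySem.List.enumerate p.2).filter (fun q => decide (q.2 = "E"))).map
          (fun q => (q.1, p.1))).foldl (fun d pr => d.modify pr.1 [] (· ++ [pr.2])) d := by
    intro d p
    rw [foldl_guard_filter (PySem.List.enumerate p.2) (fun q => q.2 = "E")
      (fun d q => d.modify q.1 [] (· ++ [p.1])) d, List.foldl_map]
  rw [PySem.List.foldl_congr_mem (PySem.List.enumerate matrix) _
      (fun d p => (((PySem.List.enumerate p.2).filter (fun q => decide (q.2 = "E"))).map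
          (fun q => (q.1, p.1))).foldl (fun d pr => d.modify pr.1 [] (· ++ [pr.2])) d)
      PySem.Dict.empty (fun acc x _ => hin acc x),
    ← foldl_flatMap (PySem.List.enumerate matrix)
      (fun p => ((PySem.List.enumerate p.2).filter (fun q => decide (q.2 = "E"))).map
        (fun q => (q.1, p.1)))
      (fun (d : PySem.Dict Int (List Int)) pr => d.modify pr.1 [] (· ++ [pr.2]))
      PySem.Dict.empty,
    PySem.Dict.getD_foldl_modify_append]
  rw [PySem.Dict.getD_empty]
  simp only [List.nil_append]
  rw [List.filter_flatMap, List.map_flatMap]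
  have hrow : ∀ p : Int × List String,
      ((((PySem.List.enumerate p.2).filter (fun q => decide (q.2 = "E"))).map
          (fun q => (q.1, p.1))).filter (fun pr => pr.1 == c)).map (fun pr => pr.2)
      = if PySem.List.pyGet? p.2 c = some "E" then [p.1] else [] := by
    intro p
    rw [List.filter_map, List.filter_filter, List.map_map]
    rw [List.filter_congr (fun q _ =>
      show _ = (fun q : Int × String => decide (q.2 = "E" ∧ q.1 = c)) q from by
        by_cases h1 : q.2 = "E" <;> by_cases h2 : q.1 = c <;>
          simp [h1, h2, Function.comp])]
    rw [show ((fun pr : Int × Int => pr.2) ∘ (fun q : Int × String => (q.1, p.1)))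
        = (fun _ => p.1) from funext fun q => rfl]
    exact rowE_key p.2 c h0 p.1
  calc (PySem.List.enumerate matrix).flatMap
        (fun p => ((((PySem.List.enumerate p.2).filter
          (fun q => decide (q.2 = "E"))).map (fun q => (q.1, p.1))).filter
            (fun pr => pr.1 == c)).map (fun pr => pr.2))
      = (PySem.List.enumerate matrix).flatMap
        (fun p => if PySem.List.pyGet? p.2 c = some "E" then [p.1] else []) := by
        apply List.flatMap_congr
        intro p _
        exact hrow p
    _ = eRowsList matrix c := by
        rw [flatMap_if_singleton]
        rfl

theorem bColsRow_nonneg (row : List String) (c : Int) (h : c ∈ bColsRow row) : 0 ≤ c := by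
  unfold bColsRow at h
  simp only [List.mem_map, List.mem_filter] at h
  obtain ⟨q, ⟨hq, -⟩, rfl⟩ := h
  rw [PySem.List.mem_enumerate_iff] at hq
  obtain ⟨k, hk, rfl⟩ := hq
  simp

theorem eRowsList_bounds (matrix : List (List String)) (c y : Int)
    (h : y ∈ eRowsList matrix c) : 0 ≤ y ∧ y < matrix.length := by
  unfold eRowsList at h
  simp only [List.mem_map, List.mem_filter] at h
  obtain ⟨q, ⟨hq, -⟩, rfl⟩ := h
  rw [PySem.List.mem_enumerate_iff] at hq
  obtain ⟨k, hk, rfl⟩ := hq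
  simp only [zero_add]
  omega

theorem obtLoop_eq (matrix : List (List String)) (fuel : Nat) :
    ∀ (r : Int) (ligne colonne : List Int), 0 ≤ r → r < matrix.length →
    PySem.List.pyGet? ligne (-1) = some r →
    obtLoopA matrix fuel ligne colonne
      = obtLoopB (matrix.map bColsRow) (eRowsDict matrix) fuel r ligne colonne := by
  induction fuel with
  | zero => intro r ligne colonne _ _ _; rfl
  | succ fuel ih =>
    intro r ligne colonne h0 hn hr
    have hn' : r.toNat < matrix.length := by omega
    have hbget : (PySem.List.pyGet? (matrix.map bColsRow) r).getD []
        = bColsRow (matrix[r.toNat]'hn') := by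
      rw [PySem.List.pyGet?_of_nonneg _ h0]
      simp [List.getElem?_eq_getElem (by simpa using hn' : r.toNat < (matrix.map bColsRow).length)]
    simp only [obtLoopA, obtLoopB, hbget,
      marquage_colonne_eq matrix ligne colonne r h0 hn hr]
    by_cases hbcnil : bColsRow (matrix[r.toNat]'hn') = []
    · simp [hbcnil]
    · have hflag : (bColsRow (matrix[r.toNat]'hn')).isEmpty = false := by
        cases h : (bColsRow (matrix[r.toNat]'hn')).isEmpty
        · rfl
        · exact absurd (List.isEmpty_iff.mp h) hbcnil
      set bc := bColsRow (matrix[r.toNat]'hn') with hbcdef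
      have hclast : bc.getLast? = some (bc.getLast hbcnil) :=
        List.getLast?_eq_some_getLast hbcnil
      have h0c : 0 ≤ bc.getLast hbcnil :=
        bColsRow_nonneg (matrix[r.toNat]'hn') _ (hbcdef ▸ List.getLast_mem hbcnil)
      have happ : PySem.List.pyGet? (colonne ++ bc) (-1) = some (bc.getLast hbcnil) := by
        rw [PySem.List.pyGet?_neg_one, List.getLast?_append_of_ne_nil colonne hbcnil,
          hclast]
      have hbl : (PySem.List.pyGet? bc (-1)).getD 0 = bc.getLast hbcnil := by
        rw [PySem.List.pyGet?_neg_one, hclast]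
        rfl
      rw [if_neg hbcnil]
      simp only [hflag, Bool.not_false, if_neg (by simp : ¬ (true = false)),
        marquage_ligne_c_eq matrix ligne (colonne ++ bc) (bc.getLast hbcnil) h0c happ,
        hbl, eRowsDict_getD matrix (bc.getLast hbcnil) h0c]
      by_cases heRnil : eRowsList matrix (bc.getLast hbcnil) = []
      · simp [heRnil]
      · set eR := eRowsList matrix (bc.getLast hbcnil) with heRdef
        have heRlast : eR.getLast? = some (eR.getLast heRnil) :=
          List.getLast?_eq_some_getLast heRnil
        have heflag : eR.isEmpty = false := by
          cases h : eR.isEmpty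
          · rfl
          · exact absurd (List.isEmpty_iff.mp h) heRnil
        obtain ⟨h0r', hnr'⟩ := eRowsList_bounds matrix (bc.getLast hbcnil)
          (eR.getLast heRnil) (heRdef ▸ List.getLast_mem heRnil)
        have happ2 : PySem.List.pyGet? (ligne ++ eR) (-1) = some (eR.getLast heRnil) := by
          rw [PySem.List.pyGet?_neg_one, List.getLast?_append_of_ne_nil ligne heRnil,
            heRlast]
        have hrget : (PySem.List.pyGet? eR (-1)).getD 0 = eR.getLast heRnil := by
          rw [PySem.List.pyGet?_neg_one, heRlast]
          rfl
        simp only [heflag, Bool.not_false, if_neg (by simp : ¬ (true = false)),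
          if_neg heRnil, hrget]
        exact ih (eR.getLast heRnil) (ligne ++ eR) (colonne ++ bc) h0r' hnr' happ2

theorem marquage_ligne_a_eq (matrix : List (List String)) :
    marquage_ligne_a matrix
      = ((PySem.List.enumerate matrix).filter (fun p => decide ("E" ∉ p.2))).map (·.1) := by
  unfold marquage_ligne_a
  have h : ∀ (l : List (Int × List String)) (acc : List Int),
      l.foldl (fun acc p => if "E" ∈ p.2 then acc else acc ++ [p.1]) acc
        = acc ++ (l.filter (fun p => decide ("E" ∉ p.2))).map (·.1) := by
    intro l
    induction l with
    | nil => simp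
    | cons x xs ih => intro acc; by_cases h : "E" ∈ x.2 <;> simp [h, ih]
  simpa using h (PySem.List.enumerate matrix) []

theorem top_eq (matrix : List (List String)) :
    (marquage_ligne_a matrix).foldl
      (fun st a => obtLoopA matrix (matrix.length + 1) (st.1 ++ [a]) st.2)
      (([], []) : List Int × List Int)
    = (PySem.List.enumerate matrix).foldl
      (fun st p => if "E" ∉ p.2 then
        obtLoopB (matrix.map bColsRow) (eRowsDict matrix) (matrix.length + 1) p.1
          (st.1 ++ [p.1]) st.2 else st)
      (([], []) : List Int × List Int) := by
  rw [marquage_ligne_a_eq, List.foldl_map,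
    foldl_guard_filter (PySem.List.enumerate matrix) (fun p => "E" ∉ p.2)
      (fun st (p : Int × List String) =>
        obtLoopB (matrix.map bColsRow) (eRowsDict matrix) (matrix.length + 1) p.1
          (st.1 ++ [p.1]) st.2)
      (([], []) : List Int × List Int)]
  apply PySem.List.foldl_congr_mem
  intro acc x hx
  rcases List.mem_filter.mp hx with ⟨hxe, -⟩
  rw [PySem.List.mem_enumerate_iff] at hxe
  obtain ⟨k, hk, rfl⟩ := hxe
  refine obtLoop_eq matrix (matrix.length + 1) _ _ _ ?_ ?_ ?_
  · simp
  · simp only [zero_add]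
    exact_mod_cast hk
  · exact PySem.List.pyGet?_neg_one_append_singleton acc.1 _

-- ===== VERDICT (by name: the statement is the Claim_ definition above) =====
theorem obtention_marquage_spec : Claim_equal_obtention_marquage := by
  intro matrix _hdom _hpre
  unfold Spec_obtention_marquage
  simp only [obtention_marquage, obtention_marquage_alt]
  rw [top_eq]
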